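-- pv_equiv track=rewrite | github.com/Tidiane971/ZeldaLike | textBank.py | dBox
-- ===== SOURCE A (Python) =====
-- def dBox(num, T):
--     coord = [0,0]
--     k=0
--     for i in range(len(T)):
--         for j in range(len(T[i])):
--             if T[i][j] == 3:
--                 k+=1
--                 if k == num:
--                     coord[0] = j
--                     coord[1] = i
--                     return coord
-- ===== SOURCE B (Python) =====
-- def dBox(num, T):
--     if num < 1:
--         return None
--     remaining = num
--     for i, row in enumerate(T):
--         c = row.count(3)
--         if remaining <= c:
--             j = -1
--             for _ in range(remaining):
--                 j += row[j + 1:].index(3) + 1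
--             return [j, i]
--         remaining -= c
--     return None
-- ===== Notes on version B (the rewrite author's own statement) =====
-- stated objective: alternative
-- what changed: B skips whole rows using per-row counts of 3s (row.count) and then locates the column inside the single target row by repeated first-occurrence searches (row[j+1:].index(3)), instead of A's cell-by-cell nested scan with a running match counter.
import Mathlib
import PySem

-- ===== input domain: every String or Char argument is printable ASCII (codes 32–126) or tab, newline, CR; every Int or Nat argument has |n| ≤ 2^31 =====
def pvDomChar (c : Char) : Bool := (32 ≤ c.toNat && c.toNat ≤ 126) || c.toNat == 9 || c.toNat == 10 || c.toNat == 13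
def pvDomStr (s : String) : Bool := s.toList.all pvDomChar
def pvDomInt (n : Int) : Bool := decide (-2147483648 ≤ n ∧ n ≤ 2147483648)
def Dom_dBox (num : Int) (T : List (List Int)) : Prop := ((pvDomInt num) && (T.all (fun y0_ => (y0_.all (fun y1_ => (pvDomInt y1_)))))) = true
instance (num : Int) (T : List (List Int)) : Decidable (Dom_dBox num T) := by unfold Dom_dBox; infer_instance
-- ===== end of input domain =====

-- B skips whole rows by their count of 3s, then locates the column inside the one
-- target row by repeated first-occurrence searches, instead of A's cell-by-cell
-- nested scan with a running counter (objective: alternative).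

-- ===== PORT A =====
-- inner loop over one row: carries the counter k; returns (final k, early-return value)
def dBoxRow (num : Int) (i : Int) (j : Int) (row : List Int) (k : Int) : Int × Option (List Int) :=
  match row with
  | [] => (k, none)
  | c :: rest =>
    if c = 3 then
      if k + 1 = num then (k + 1, some [j, i])
      else dBoxRow num i (j + 1) rest (k + 1)
    else dBoxRow num i (j + 1) rest k

-- outer loop over the rows; falling off the end is Python's implicit 'return None'
def dBoxRows (num : Int) (i : Int) (rows : List (List Int)) (k : Int) : Option (List Int) :=
  match rows with
  | [] => none
  | r :: rest =>
    match dBoxRow num i 0 r k with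
    | (_, some v) => some v
    | (k', none) => dBoxRows num (i + 1) rest k'

def dBox (num : Int) (T : List (List Int)) : Option (List Int) :=
  dBoxRows num 0 T 0

-- ===== PORT B =====
-- 'for _ in range(remaining): j += row[j+1:].index(3) + 1'; none = ValueError
-- (unreachable here: the caller only enters the loop when remaining ≤ row.count(3))
def dBoxAltCol (row : List Int) : Nat → Int → Option Int
  | 0, j => some j
  | n + 1, j =>
    match PySem.List.index? (PySem.List.slice row (some (j + 1)) none) 3 with
    | some m => dBoxAltCol row n (j + 1 + (m : Int))
    | none => none

-- 'for i, row in enumerate(T): …'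
def dBoxAltRows (rem : Int) (i : Int) (rows : List (List Int)) : Option (List Int) :=
  match rows with
  | [] => none
  | row :: rest =>
    let c : Int := PySem.List.count row 3
    if rem ≤ c then
      match dBoxAltCol row rem.toNat (-1) with
      | some j => some [j, i]
      | none => none
    else dBoxAltRows (rem - c) (i + 1) rest

def dBox_alt (num : Int) (T : List (List Int)) : Option (List Int) :=
  if num < 1 then none else dBoxAltRows num 0 T

-- ===== PRECONDITION & SPEC =====
def Spec_dBox (num : Int) (T : List (List Int)) (out : Option (List Int)) : Prop := out = dBox_alt num T
instance (num : Int) (T : List (List Int)) (out : Option (List Int)) : Decidable (Spec_dBox num T out) := by unfold Spec_dBox; infer_instance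

-- ===== CLAIM (what is proved, stated in full; the proofs are below) =====
def Claim_equal_dBox : Prop := ∀ (num : Int) (T : List (List Int)), Dom_dBox num T → Spec_dBox num T (dBox num T)

-- ===== LEMMAS AND PROOFS =====

-- select the m-th element (1-based), none if out of range
def pvSel (m : Int) (ms : List (List Int)) : Option (List Int) :=
  if 1 ≤ m ∧ m ≤ (ms.length : Int) then ms[(m - 1).toNat]? else none

-- the match coordinates produced by one row
def pvRowMs (i : Int) (j : Int) (row : List Int) : List (List Int) :=
  match row with
  | [] => []
  | c :: rest => if c = 3 then [j, i] :: pvRowMs i (j + 1) rest else pvRowMs i (j + 1) rest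

def pvAllMs (i : Int) (rows : List (List Int)) : List (List Int) :=
  match rows with
  | [] => []
  | r :: rest => pvRowMs i 0 r ++ pvAllMs (i + 1) rest

-- the columns of the 3-cells of one row, starting index j
def pvCols (j : Int) (row : List Int) : List Int :=
  match row with
  | [] => []
  | c :: rest => if c = 3 then j :: pvCols (j + 1) rest else pvCols (j + 1) rest

theorem pvSel_cons (m : Int) (x : List Int) (ms : List (List Int)) (hm : m ≠ 1) :
    pvSel m (x :: ms) = pvSel (m - 1) ms := by
  unfold pvSel
  by_cases h1 : 1 ≤ m - 1 ∧ m - 1 ≤ (ms.length : Int)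
  · rw [if_pos h1, if_pos ⟨by omega, by simp; omega⟩]
    have : (m - 1).toNat = (m - 1 - 1).toNat + 1 := by omega
    rw [this]
    simp
  · rw [if_neg h1, if_neg (by simp; omega)]

theorem pvSel_append_left {m : Int} {ms1 : List (List Int)} (ms2 : List (List Int))
    {v : List Int} (h : pvSel m ms1 = some v) : pvSel m (ms1 ++ ms2) = some v := by
  unfold pvSel at h ⊢
  by_cases hc : 1 ≤ m ∧ m ≤ (ms1.length : Int)
  · rw [if_pos hc] at h
    rw [if_pos ⟨hc.1, by simp; omega⟩, List.getElem?_append_left (by omega)]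
    exact h
  · rw [if_neg hc] at h; exact absurd h (by simp)

theorem pvSel_append_right {m : Int} {ms1 : List (List Int)} (ms2 : List (List Int))
    (h : pvSel m ms1 = none) : pvSel m (ms1 ++ ms2) = pvSel (m - ms1.length) ms2 := by
  unfold pvSel at h ⊢
  have hc : ¬ (1 ≤ m ∧ m ≤ (ms1.length : Int)) := by
    by_contra hin
    rw [if_pos hin] at h
    have hlt : (m - 1).toNat < ms1.length := by omega
    rw [List.getElem?_eq_getElem hlt] at h
    exact absurd h (by simp)
  by_cases hlo : 1 ≤ m
  · have hgt : (ms1.length : Int) < m := by omega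
    by_cases hhi : m ≤ (ms1.length : Int) + (ms2.length : Int)
    · rw [if_pos ⟨hlo, by simp; omega⟩, if_pos ⟨by omega, by omega⟩,
        List.getElem?_append_right (by omega)]
      congr 1
      omega
    · rw [if_neg (by simp; omega), if_neg (by omega)]
  · rw [if_neg (by simp; omega), if_neg (by omega)]

theorem dBoxRow_eq (num i : Int) (row : List Int) : ∀ (j k : Int),
    (dBoxRow num i j row k).2 = pvSel (num - k) (pvRowMs i j row) ∧
    ((dBoxRow num i j row k).2 = none →
      (dBoxRow num i j row k).1 = k + (pvRowMs i j row).length) := by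
  induction row with
  | nil => intro j k; constructor
           · simp [dBoxRow, pvRowMs, pvSel]
           · intro _; simp [dBoxRow, pvRowMs]
  | cons c rest ih =>
    intro j k
    simp only [dBoxRow, pvRowMs]
    by_cases hc : c = 3
    · simp only [if_pos hc]
      by_cases hk : k + 1 = num
      · simp only [if_pos hk]
        constructor
        · have h1 : num - k = 1 := by omega
          simp [pvSel, h1]
        · intro h; exact absurd h (by simp)
      · simp only [if_neg hk]
        obtain ⟨ha, hb⟩ := ih (j + 1) (k + 1)
        refine ⟨?_, fun hn => by rw [hb hn]; simp; omega⟩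
        rw [ha, pvSel_cons _ _ _ (by omega)]
        congr 1
        omega
    · simp only [if_neg hc]
      exact ih (j + 1) k

theorem dBoxRows_eq (num : Int) (rows : List (List Int)) : ∀ (i k : Int),
    dBoxRows num i rows k = pvSel (num - k) (pvAllMs i rows) := by
  induction rows with
  | nil => intro i k; simp [dBoxRows, pvAllMs, pvSel]
  | cons r rest ih =>
    intro i k
    obtain ⟨h1, h2⟩ := dBoxRow_eq num i r 0 k
    simp only [dBoxRows, pvAllMs]
    rcases he : dBoxRow num i 0 r k with ⟨k', o⟩
    rw [he] at h1 h2
    rcases o with _ | v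
    · simp only at h1 h2 ⊢
      rw [ih (i + 1) k', h2 trivial, pvSel_append_right _ h1.symm]
      congr 1
      omega
    · simp only at h1 ⊢
      rw [pvSel_append_left _ h1.symm]

-- B-side lemmas --------------------------------------------------------------

theorem pvRowMs_eq_map_cols (i : Int) (row : List Int) : ∀ (j : Int),
    pvRowMs i j row = (pvCols j row).map (fun c => [c, i]) := by
  induction row with
  | nil => intro j; simp [pvRowMs, pvCols]
  | cons c rest ih =>
    intro j
    by_cases hc : c = 3 <;> simp [pvRowMs, pvCols, hc, ih (j + 1)]

theorem count_eq_cols_length (row : List Int) : ∀ (j : Int),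
    PySem.List.count row 3 = (pvCols j row).length := by
  induction row with
  | nil => intro j; simp [PySem.List.count, pvCols]
  | cons c rest ih =>
    intro j
    have h := ih (j + 1)
    simp only [PySem.List.count] at h ⊢
    by_cases hc : c = 3 <;> simp [pvCols, hc, h]

-- first occurrence vs pvCols
theorem pvCols_index (row : List Int) : ∀ (s : Int),
    (PySem.List.index? row 3 = none → pvCols s row = []) ∧
    (∀ m : Nat, PySem.List.index? row 3 = some m →
      pvCols s row = (s + m) :: pvCols (s + m + 1) (row.drop (m + 1))) := by
  induction row with
  | nil =>
    intro s
    refine ⟨fun _ => rfl, fun m hm => ?_⟩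
    rw [(PySem.List.index?_eq_none_iff _ _).2 (by simp)] at hm
    exact absurd hm (by simp)
  | cons c rest ih =>
    intro s
    by_cases hc : c = 3
    · subst hc
      rw [PySem.List.index?_cons_self]
      refine ⟨fun h => absurd h (by simp), fun m hm => ?_⟩
      have : m = 0 := by simpa using hm.symm
      subst this
      simp [pvCols]
    · rw [PySem.List.index?_cons_of_ne rest hc]
      constructor
      · intro h
        have hn : PySem.List.index? rest 3 = none := by
          rcases hr : PySem.List.index? rest 3 with _ | m
          · rfl
          · rw [hr] at h; exact absurd h (by simp)
        simp [pvCols, hc, (ih (s + 1)).1 hn]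
      · intro m hm
        rcases hr : PySem.List.index? rest 3 with _ | m'
        · rw [hr] at hm; exact absurd hm (by simp)
        · rw [hr] at hm
          have hmm : m = m' + 1 := by simpa using hm.symm
          subst hmm
          have := (ih (s + 1)).2 m' hr
          simp only [pvCols, if_neg hc, this, List.drop_succ_cons]
          have h1 : s + 1 + (m' : Int) = s + ((m' + 1 : Nat) : Int) := by push_cast; ring
          rw [h1]

theorem dBoxAltCol_eq (row : List Int) : ∀ (n : Nat) (j : Int), -1 ≤ j →
    (n + 1 ≤ (pvCols (j + 1) (row.drop (j + 1).toNat)).length) →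
    dBoxAltCol row (n + 1) j = (pvCols (j + 1) (row.drop (j + 1).toNat))[n]? := by
  intro n
  induction n with
  | zero =>
    intro j hj hlen
    have hslice : PySem.List.slice row (some (j + 1)) none = row.drop (j + 1).toNat := by
      rw [show some (j + 1) = some (((j + 1).toNat : Nat) : Int) by
            rw [Int.toNat_of_nonneg (by omega)],
        PySem.List.slice_from_natCast]
    rcases hr : PySem.List.index? (row.drop (j + 1).toNat) 3 with _ | m
    · rw [(pvCols_index _ (j + 1)).1 hr] at hlen; simp at hlen
    · have hcols := (pvCols_index _ (j + 1)).2 m hr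
      rw [hcols]
      simp only [dBoxAltCol, hslice]
      split
      · next m' hm' =>
        rw [hm'] at hr
        rw [Option.some.inj hr]
        simp
      · next hm' =>
        rw [hm'] at hr
        exact absurd hr (by simp)
  | succ n ih =>
    intro j hj hlen
    have hslice : PySem.List.slice row (some (j + 1)) none = row.drop (j + 1).toNat := by
      rw [show some (j + 1) = some (((j + 1).toNat : Nat) : Int) by
            rw [Int.toNat_of_nonneg (by omega)],
        PySem.List.slice_from_natCast]
    rcases hr : PySem.List.index? (row.drop (j + 1).toNat) 3 with _ | m
    · rw [(pvCols_index _ (j + 1)).1 hr] at hlen; simp at hlen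
    · have hcols := (pvCols_index _ (j + 1)).2 m hr
      have hj' : (-1 : Int) ≤ j + 1 + (m : Int) := by omega
      have hdrop : row.drop (j + 1 + (m : Int) + 1).toNat
          = (row.drop (j + 1).toNat).drop (m + 1) := by
        rw [List.drop_drop]
        congr 1
        omega
      have ihx := ih (j + 1 + (m : Int)) hj'
        (by rw [hdrop]; rw [hcols] at hlen; simp at hlen ⊢; omega)
      rw [show dBoxAltCol row (n + 1 + 1) j
            = dBoxAltCol row (n + 1) (j + 1 + (m : Int)) by
          simp only [dBoxAltCol, hslice, hr]]
      rw [ihx, hdrop, hcols]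
      simp

theorem dBoxAltRows_eq (rows : List (List Int)) : ∀ (rem i : Int), 1 ≤ rem →
    dBoxAltRows rem i rows = pvSel rem (pvAllMs i rows) := by
  induction rows with
  | nil => intro rem i h; simp [dBoxAltRows, pvAllMs, pvSel]
  | cons row rest ih =>
    intro rem i h
    simp only [dBoxAltRows, pvAllMs]
    have hcount : PySem.List.count row 3 = (pvCols 0 row).length := count_eq_cols_length row 0
    by_cases hle : rem ≤ (PySem.List.count row 3 : Int)
    · rw [if_pos hle]
      rw [hcount] at hle
      obtain ⟨n, hn⟩ : ∃ n, rem.toNat = n + 1 := ⟨rem.toNat - 1, by omega⟩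
      have hc := dBoxAltCol_eq row n (-1) (by omega) (by norm_num; omega)
      norm_num at hc
      have hlt : n < (pvCols 0 row).length := by omega
      have hget : (pvCols 0 row)[n]? = some ((pvCols 0 row)[n]'hlt) := List.getElem?_eq_getElem hlt
      have hsel : pvSel rem (pvRowMs i 0 row) = some [(pvCols 0 row)[n]'hlt, i] := by
        unfold pvSel
        rw [if_pos ⟨h, by rw [pvRowMs_eq_map_cols]; simp; omega⟩]
        rw [pvRowMs_eq_map_cols, show (rem - 1).toNat = n by omega]
        simp [hget]
      rw [hn, hc, hget]
      simp only
      rw [pvSel_append_left _ hsel]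
    · rw [if_neg hle]
      rw [hcount] at hle
      have hnone : pvSel rem (pvRowMs i 0 row) = none := by
        unfold pvSel
        rw [if_neg]
        rw [pvRowMs_eq_map_cols]
        simp
        omega
      rw [ih (rem - PySem.List.count row 3) (i + 1) (by rw [hcount]; omega),
        pvSel_append_right _ hnone, pvRowMs_eq_map_cols, List.length_map, hcount]

-- ===== VERDICT (by name: the statement is the Claim_ definition above) =====
theorem dBox_spec : Claim_equal_dBox := by
  intro num T _
  unfold Spec_dBox dBox dBox_alt
  rw [dBoxRows_eq]
  simp only [Int.sub_zero]
  by_cases h : num < 1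
  · rw [if_pos h]
    unfold pvSel
    rw [if_neg (by omega)]
  · rw [if_neg h, dBoxAltRows_eq _ _ _ (by omega)]
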